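-- pv_equiv track=rewrite | github.com/Praciller/poc_web_scraper | ai_analyzer.py | integrate_partials
-- ===== SOURCE A (Python) =====
-- def integrate_partials(content_type, partial_jsons):
--     if content_type == "article":
--         final_obj = {
--             "Title": "",
--             "Summary": "",
--             "Publication Date": "",
--             "Category": "",
--             "Link": ""
--         }
--     else:  # job
--         final_obj = {
--             "Company": "",
--             "Position": "",
--             "Contact person": "",
--             "Contact email": "",
--             "Mobile number": "",
--             "Comments": "",
--             "Information source": ""
--         }
--
--     for partial in partial_jsons:
--         if not partial:
--             continue
--         for key in final_obj:
--             if final_obj[key] == "" and key in partial and partial[key]: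
--                 final_obj[key] = partial[key]
--
--     return final_obj
-- ===== SOURCE B (Python) =====
-- def integrate_partials(content_type, partial_jsons):
--     if content_type == "article":
--         keys = ["Title", "Summary", "Publication Date", "Category", "Link"]
--     else:  # job
--         keys = ["Company", "Position", "Contact person", "Contact email",
--                 "Mobile number", "Comments", "Information source"]
--     return {key: next((p[key] for p in partial_jsons if p and key in p and p[key]), "")
--             for key in keys}
-- ===== Notes on version B (the rewrite author's own statement) =====
-- stated objective: idiomatic
-- what changed: A mutates a template dict, sweeping all partials and all keys with a sticky only-fill-if-still-empty guard; B builds the result in one dict comprehension that searches each template key independently for its first truthy value via next().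
import Mathlib
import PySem

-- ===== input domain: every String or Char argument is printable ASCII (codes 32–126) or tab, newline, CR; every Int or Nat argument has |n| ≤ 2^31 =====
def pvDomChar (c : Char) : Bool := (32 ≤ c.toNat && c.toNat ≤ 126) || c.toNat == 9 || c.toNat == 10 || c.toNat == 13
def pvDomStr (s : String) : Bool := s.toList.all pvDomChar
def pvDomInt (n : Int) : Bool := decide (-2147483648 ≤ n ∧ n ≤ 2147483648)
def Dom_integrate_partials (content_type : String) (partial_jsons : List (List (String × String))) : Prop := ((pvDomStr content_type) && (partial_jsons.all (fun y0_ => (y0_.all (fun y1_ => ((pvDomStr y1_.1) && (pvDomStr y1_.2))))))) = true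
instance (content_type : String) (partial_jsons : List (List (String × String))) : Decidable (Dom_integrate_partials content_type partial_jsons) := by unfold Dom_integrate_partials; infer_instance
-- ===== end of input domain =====

-- B replaces A's sticky accumulate-across-partials loop by an independent first-truthy
-- search per template key (an idiomatic dict comprehension); same return value.

-- ===== PORT A =====
-- body of A's inner 'for key in final_obj' loop
def pvInnerStep (p : List (String × String)) (acc : PySem.Dict String String) (key : String) : PySem.Dict String String :=
  if acc.getD key "" == "" && (PySem.Dict.mk p).contains key && !((PySem.Dict.mk p).getD key "" == "")
  then acc.insert key ((PySem.Dict.mk p).getD key "")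
  else acc

def integrate_partials (content_type : String) (partial_jsons : List (List (String × String))) : List (String × String) :=
  let final_obj : PySem.Dict String String :=
    if content_type == "article" then
      PySem.Dict.mk [("Title", ""), ("Summary", ""), ("Publication Date", ""), ("Category", ""), ("Link", "")]
    else
      PySem.Dict.mk [("Company", ""), ("Position", ""), ("Contact person", ""), ("Contact email", ""),
                     ("Mobile number", ""), ("Comments", ""), ("Information source", "")]
  let final_obj := partial_jsons.foldl (fun acc part =>
    if part = [] then acc
    else acc.keys.foldl (pvInnerStep part) acc) final_obj
  final_obj.items

-- ===== PORT B =====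
-- next((p[key] for p in partial_jsons if p and key in p and p[key]), "")
def pvFirstTruthy (key : String) : List (List (String × String)) → String
  | [] => ""
  | p :: ps =>
    if p ≠ [] then
      match (PySem.Dict.mk p).get? key with
      | some v => if v ≠ "" then v else pvFirstTruthy key ps
      | none => pvFirstTruthy key ps
    else pvFirstTruthy key ps

def integrate_partials_alt (content_type : String) (partial_jsons : List (List (String × String))) : List (String × String) :=
  let keys : List String :=
    if content_type == "article" then
      ["Title", "Summary", "Publication Date", "Category", "Link"]
    else
      ["Company", "Position", "Contact person", "Contact email",
       "Mobile number", "Comments", "Information source"]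
  keys.map (fun key => (key, pvFirstTruthy key partial_jsons))

-- ===== PRECONDITION & SPEC =====
def Spec_integrate_partials (content_type : String) (partial_jsons : List (List (String × String))) (out : List (String × String)) : Prop := out = integrate_partials_alt content_type partial_jsons
instance (content_type : String) (partial_jsons : List (List (String × String))) (out : List (String × String)) : Decidable (Spec_integrate_partials content_type partial_jsons out) := by unfold Spec_integrate_partials; infer_instance

-- ===== CLAIM (what is proved, stated in full; the proofs are below) =====
def Claim_equal_integrate_partials : Prop := ∀ (content_type : String) (partial_jsons : List (List (String × String))), Dom_integrate_partials content_type partial_jsons → Spec_integrate_partials content_type partial_jsons (integrate_partials content_type partial_jsons)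

-- ===== LEMMAS AND PROOFS =====

-- one step of B's search, expressed through getD (getD _ "" collapses 'missing' and 'present but falsy')
lemma pvFirstTruthy_cons (key : String) (p : List (String × String)) (ps : List (List (String × String))) :
    pvFirstTruthy key (p :: ps) =
      if (PySem.Dict.mk p).getD key "" = "" then pvFirstTruthy key ps else (PySem.Dict.mk p).getD key "" := by
  rw [pvFirstTruthy]
  by_cases hp : p = []
  · subst hp
    simp [PySem.Dict.getD_eq_get?_getD, PySem.Dict.get?]
  · simp only [hp, ne_eq, not_false_eq_true, if_true]
    rcases hg : (PySem.Dict.mk p).get? key with _ | v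
    · simp [PySem.Dict.getD_of_get?_eq_none _ _ hg]
    · simp only [PySem.Dict.getD_of_get?_eq_some _ "" hg]
      by_cases hv : v = "" <;> simp [hv]

lemma pvInnerStep_keys (p : List (String × String)) (d : PySem.Dict String String) (k : String)
    (h : d.contains k = true) : (pvInnerStep p d k).keys = d.keys := by
  unfold pvInnerStep
  split_ifs with hc
  · exact PySem.Dict.keys_insert_of_contains _ _ h
  · rfl

-- A's inner-loop body only ever turns an empty slot into the partial's value at that key
lemma pvInnerStep_getD (p : List (String × String)) (d : PySem.Dict String String) (k j : String) :
    (pvInnerStep p d k).getD j "" =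
      if j = k ∧ d.getD k "" = "" then (PySem.Dict.mk p).getD j "" else d.getD j "" := by
  by_cases hjk : j = k
  · subst hjk
    by_cases hd : d.getD j "" = ""
    · simp only [hd, and_self, if_true]
      cases hcont : (PySem.Dict.mk p).contains j with
      | true =>
        by_cases hv : (PySem.Dict.mk p).getD j "" = ""
        · unfold pvInnerStep
          simp [hd, hcont, hv]
        · unfold pvInnerStep
          simp [hd, hcont, hv, PySem.Dict.getD_insert]
      | false =>
        have h0 : (PySem.Dict.mk p).getD j "" = "" :=
          PySem.Dict.getD_of_not_contains _ _ hcont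
        unfold pvInnerStep
        simp [hcont, h0, hd]
    · have : ¬(j = j ∧ d.getD j "" = "") := by simp [hd]
      simp only [this, if_false]
      unfold pvInnerStep
      simp [hd]
  · have : ¬(j = k ∧ d.getD k "" = "") := by simp [hjk]
    simp only [this, if_false]
    unfold pvInnerStep
    split_ifs with hc
    · rw [PySem.Dict.getD_insert]
      simp [hjk]
    · rfl

-- A's whole inner loop, pointwise: keys unchanged, each slot in K filled from the partial if it was empty
lemma pvInnerFold (p : List (String × String)) :
    ∀ (K : List String) (d : PySem.Dict String String), (∀ k ∈ K, d.contains k = true) →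
      (K.foldl (pvInnerStep p) d).keys = d.keys ∧
      ∀ j, (K.foldl (pvInnerStep p) d).getD j "" =
        if j ∈ K ∧ d.getD j "" = "" then (PySem.Dict.mk p).getD j "" else d.getD j "" := by
  intro K
  induction K with
  | nil => intro d _; exact ⟨rfl, by simp⟩
  | cons k0 K ih =>
    intro d hcont
    have hk0 : d.contains k0 = true := hcont k0 (by simp)
    have hkeys : (pvInnerStep p d k0).keys = d.keys := pvInnerStep_keys p d k0 hk0
    have hcont' : ∀ k ∈ K, (pvInnerStep p d k0).contains k = true := by
      intro k hk
      rw [PySem.Dict.contains_iff_mem_keys, hkeys, ← PySem.Dict.contains_iff_mem_keys]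
      exact hcont k (by simp [hk])
    obtain ⟨h1, h2⟩ := ih (pvInnerStep p d k0) hcont'
    refine ⟨by simpa [hkeys] using h1, ?_⟩
    intro j
    rw [List.foldl_cons] at *
    rw [h2 j, pvInnerStep_getD]
    by_cases hj0 : j = k0
    · subst hj0
      by_cases hd : d.getD j "" = ""
      · by_cases hjK : j ∈ K
        · simp [hd, hjK]
        · simp [hd, hjK]
      · simp [hd]
    · simp only [hj0, false_and, if_false]
      by_cases hjK : j ∈ K <;> simp [hjK, hj0]

-- A's outer loop, pointwise: a slot ends up holding its first truthy value across the partials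
lemma pvOuterFold :
    ∀ (pjs : List (List (String × String))) (d : PySem.Dict String String),
      (pjs.foldl (fun acc part => if part = [] then acc else acc.keys.foldl (pvInnerStep part) acc) d).keys = d.keys ∧
      ∀ j ∈ d.keys,
        (pjs.foldl (fun acc part => if part = [] then acc else acc.keys.foldl (pvInnerStep part) acc) d).getD j "" =
          if d.getD j "" = "" then pvFirstTruthy j pjs else d.getD j "" := by
  intro pjs
  induction pjs with
  | nil =>
    intro d
    refine ⟨rfl, ?_⟩
    intro j _
    simp only [List.foldl_nil, pvFirstTruthy]
    by_cases hd : d.getD j "" = "" <;> simp [hd]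
  | cons p ps ih =>
    intro d
    by_cases hp : p = []
    · subst hp
      obtain ⟨h1, h2⟩ := ih d
      refine ⟨by simpa using h1, ?_⟩
      intro j hj
      simp only [List.foldl_cons, eq_self_iff_true, if_true]
      rw [h2 j hj, pvFirstTruthy_cons]
      have : (PySem.Dict.mk ([] : List (String × String))).getD j "" = "" := by
        simp [PySem.Dict.getD_eq_get?_getD, PySem.Dict.get?]
      simp [this]
    · have hstep : ∀ k ∈ d.keys, d.contains k = true := fun k hk =>
        (PySem.Dict.contains_iff_mem_keys d k).mpr hk
      obtain ⟨g1, g2⟩ := pvInnerFold p d.keys d hstep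
      set d' := d.keys.foldl (pvInnerStep p) d with hd'
      obtain ⟨h1, h2⟩ := ih d'
      constructor
      · simp only [List.foldl_cons, if_neg hp]
        rw [h1, g1]
      · intro j hj
        simp only [List.foldl_cons, if_neg hp]
        rw [h2 j (by rw [g1]; exact hj), g2 j, pvFirstTruthy_cons]
        by_cases hd0 : d.getD j "" = ""
        · by_cases hv : (PySem.Dict.mk p).getD j "" = "" <;> simp [hj, hd0, hv]
        · simp [hd0]

lemma pvMain (content_type : String) (partial_jsons : List (List (String × String))) :
    integrate_partials content_type partial_jsons = integrate_partials_alt content_type partial_jsons := by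
  unfold integrate_partials integrate_partials_alt
  cases hct : (content_type == "article") with
  | true =>
    simp only [if_true]
    obtain ⟨h1, h2⟩ := pvOuterFold partial_jsons
      (PySem.Dict.mk [("Title", ""), ("Summary", ""), ("Publication Date", ""), ("Category", ""), ("Link", "")])
    rw [PySem.Dict.items_eq_map_keys _ (by rw [h1]; decide) "", h1]
    simp only [PySem.Dict.keys_mk, List.map_cons, List.map_nil]
    rw [h2 "Title" (by decide), h2 "Summary" (by decide), h2 "Publication Date" (by decide),
        h2 "Category" (by decide), h2 "Link" (by decide)]
    simp [PySem.Dict.getD, PySem.Dict.get?, List.find?]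
  | false =>
    simp only [Bool.false_eq_true, if_false]
    obtain ⟨h1, h2⟩ := pvOuterFold partial_jsons
      (PySem.Dict.mk [("Company", ""), ("Position", ""), ("Contact person", ""), ("Contact email", ""),
                     ("Mobile number", ""), ("Comments", ""), ("Information source", "")])
    rw [PySem.Dict.items_eq_map_keys _ (by rw [h1]; decide) "", h1]
    simp only [PySem.Dict.keys_mk, List.map_cons, List.map_nil]
    rw [h2 "Company" (by decide), h2 "Position" (by decide), h2 "Contact person" (by decide),
        h2 "Contact email" (by decide), h2 "Mobile number" (by decide),
        h2 "Comments" (by decide), h2 "Information source" (by decide)]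
    simp [PySem.Dict.getD, PySem.Dict.get?, List.find?]

-- ===== VERDICT (by name: the statement is the Claim_ definition above) =====
theorem integrate_partials_spec : Claim_equal_integrate_partials := by
  intro content_type partial_jsons _
  exact pvMain content_type partial_jsons
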